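-- pv_equiv track=rewrite | github.com/pypi-data/pypi-mirror-148 | packages/utilum/utilum-0.1.3.tar.gz/utilum-0.1.3/utilum/file.py | slashMatchSlash
-- ===== SOURCE A (Python) =====
-- def slashMatchSlash(path, startslash,endslash):
--     slashCount=1
--     start_index=0
--     end_index=len(path)
--
--     for ip,p in enumerate(path):
--         if(p=="/"):
--             if(endslash!=-1):
--                 if(slashCount==startslash):
--                     start_index=ip+1
--                 if(slashCount== endslash):
--                     end_index=ip
--                 slashCount+=1
--             else:
--                 if(slashCount==startslash):
--                     start_index=ip+1
--                 slashCount+=1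
--     return path[start_index:end_index]+"/"
-- ===== SOURCE B (Python) =====
-- def slashMatchSlash(path, startslash, endslash):
--     positions = [i for i, c in enumerate(path) if c == "/"]
--     start_index = positions[startslash - 1] + 1 if 1 <= startslash <= len(positions) else 0
--     end_index = positions[endslash - 1] if 1 <= endslash <= len(positions) else len(path)
--     return path[start_index:end_index] + "/"
-- ===== Notes on version B (the rewrite author's own statement) =====
-- stated objective: simpler
-- what changed: B replaces A's slash-counting state machine (tracking slashCount/start_index/end_index while scanning) with a slash-position table built once, followed by two arithmetic range-checked lookups for the start and end indices.
import Mathlib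
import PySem

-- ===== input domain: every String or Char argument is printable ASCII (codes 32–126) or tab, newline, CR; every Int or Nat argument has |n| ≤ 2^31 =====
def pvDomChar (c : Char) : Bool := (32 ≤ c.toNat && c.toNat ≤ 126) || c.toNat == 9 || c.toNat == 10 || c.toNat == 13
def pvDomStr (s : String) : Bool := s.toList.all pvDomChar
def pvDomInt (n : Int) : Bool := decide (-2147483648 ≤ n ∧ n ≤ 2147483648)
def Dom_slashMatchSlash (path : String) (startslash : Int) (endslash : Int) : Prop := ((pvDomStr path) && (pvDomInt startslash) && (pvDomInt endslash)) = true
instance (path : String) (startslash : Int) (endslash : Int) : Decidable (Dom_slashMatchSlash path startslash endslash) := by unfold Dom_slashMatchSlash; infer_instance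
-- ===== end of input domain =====

-- B replaces A's slash-counting state machine by a slash-position table plus two arithmetic lookups (objective: simpler).

-- ===== PORT A =====
-- the loop body of A, step for step; state = (slashCount, start_index, end_index)
def slashLoopA (startslash endslash : Int) : List (Int × Char) → Int × Int × Int → Int × Int × Int
  | [], st => st
  | (ip, p) :: rest, (slashCount, start_index, end_index) =>
    if p = '/' then
      if endslash ≠ -1 then
        slashLoopA startslash endslash rest
          (slashCount + 1,
           (if slashCount = startslash then ip + 1 else start_index),
           (if slashCount = endslash then ip else end_index))
      else
        slashLoopA startslash endslash rest
          (slashCount + 1,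
           (if slashCount = startslash then ip + 1 else start_index),
           end_index)
    else
      slashLoopA startslash endslash rest (slashCount, start_index, end_index)

def slashMatchSlash (path : String) (startslash : Int) (endslash : Int) : String :=
  let st := slashLoopA startslash endslash (PySem.List.enumerate path.toList)
              (1, 0, (path.toList.length : Int))
  String.ofList (PySem.Chars.slice path.toList (some st.2.1) (some st.2.2) ++ ['/'])

-- ===== PORT B =====
def slashMatchSlash_alt (path : String) (startslash : Int) (endslash : Int) : String :=
  let positions : List Int :=
    (PySem.List.enumerate path.toList).filterMap
      (fun q => if q.2 = '/' then some q.1 else none)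
  let start_index : Int :=
    if 1 ≤ startslash ∧ startslash ≤ positions.length
      then PySem.List.pyGetD positions (startslash - 1) 0 + 1 else 0
  let end_index : Int :=
    if 1 ≤ endslash ∧ endslash ≤ positions.length
      then PySem.List.pyGetD positions (endslash - 1) 0
      else (path.toList.length : Int)
  String.ofList (PySem.Chars.slice path.toList (some start_index) (some end_index) ++ ['/'])

-- ===== PRECONDITION & SPEC =====
def Spec_slashMatchSlash (path : String) (startslash : Int) (endslash : Int) (out : String) : Prop := out = slashMatchSlash_alt path startslash endslash
instance (path : String) (startslash : Int) (endslash : Int) (out : String) : Decidable (Spec_slashMatchSlash path startslash endslash out) := by unfold Spec_slashMatchSlash; infer_instance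

-- ===== CLAIM (what is proved, stated in full; the proofs are below) =====
def Claim_equal_slashMatchSlash : Prop := ∀ (path : String) (startslash : Int) (endslash : Int), Dom_slashMatchSlash path startslash endslash → Spec_slashMatchSlash path startslash endslash (slashMatchSlash path startslash endslash)

-- ===== LEMMAS AND PROOFS =====

-- positional lookup used to characterise A's loop: element at integer index q, default d out of range
def pickI (ps : List Int) (q : Int) (d : Int) : Int :=
  match ps with
  | [] => d
  | a :: t => if q = 0 then a else pickI t (q - 1) d

lemma pickI_neg (ps : List Int) (q d : Int) (hq : q < 0) : pickI ps q d = d := by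
  induction ps generalizing q with
  | nil => simp [pickI]
  | cons a t ih =>
    simp only [pickI, if_neg (by omega : ¬ q = 0)]
    exact ih (q - 1) (by omega)

lemma pickI_in_range (ps : List Int) (q d : Int) (h0 : 0 ≤ q) (h1 : q < ps.length) :
    pickI ps q d = ps[q.toNat]'(by omega) := by
  induction ps generalizing q with
  | nil => simp at h1; omega
  | cons a t ih =>
    simp only [pickI]
    by_cases hq : q = 0
    · subst hq
      rw [if_pos rfl]
      rfl
    · rw [if_neg hq, ih (q - 1) (by omega) (by simp at h1 ⊢; omega)]
      have hn : q.toNat = (q - 1).toNat + 1 := by omega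
      simp only [hn, List.getElem_cons_succ]

lemma pickI_out_of_range (ps : List Int) (q d : Int) (h : ¬ (0 ≤ q ∧ q < ps.length)) :
    pickI ps q d = d := by
  by_cases hq : q < 0
  · exact pickI_neg ps q d hq
  · induction ps generalizing q with
    | nil => simp [pickI]
    | cons a t ih =>
      simp only [pickI]
      rw [if_neg (by simp at h; omega)]
      by_cases h2 : q - 1 < 0
      · exact pickI_neg t (q - 1) d h2
      · exact ih (q - 1) (by simp at h ⊢; omega) h2

def slashPos (pairs : List (Int × Char)) : List Int :=
  pairs.filterMap (fun q => if q.2 = '/' then some q.1 else none)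

-- the loop invariant: A's loop computes table lookups into the slash positions of the remaining pairs
lemma slashLoopA_spec (startslash endslash : Int) (pairs : List (Int × Char))
    (c s e : Int) :
    slashLoopA startslash endslash pairs (c, s, e) =
      (c + (slashPos pairs).length,
       pickI ((slashPos pairs).map (· + 1)) (startslash - c) s,
       if endslash = -1 then e else pickI (slashPos pairs) (endslash - c) e) := by
  induction pairs generalizing c s e with
  | nil => simp [slashLoopA, slashPos, pickI]
  | cons hd tl ih =>
    obtain ⟨ip, p⟩ := hd
    by_cases hp : p = '/'
    · subst hp
      have hpos : slashPos ((ip, '/') :: tl) = ip :: slashPos tl := by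
        simp [slashPos]
      by_cases he : endslash = -1
      · rw [show slashLoopA startslash endslash ((ip, '/') :: tl) (c, s, e) =
              slashLoopA startslash endslash tl
                (c + 1, (if c = startslash then ip + 1 else s), e) by
            simp [slashLoopA, he]]
        rw [ih, hpos]
        refine Prod.ext ?_ (Prod.ext ?_ ?_)
        · simp; omega
        · show pickI ((slashPos tl).map (· + 1)) (startslash - (c + 1))
              (if c = startslash then ip + 1 else s) =
            pickI ((ip + 1) :: (slashPos tl).map (· + 1)) (startslash - c) s
          simp only [pickI]
          by_cases hs : c = startslash
          · subst hs
            rw [if_pos rfl, if_pos (by omega : c - c = 0),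
              pickI_neg _ _ _ (by omega : c - (c + 1) < 0)]
          · rw [if_neg hs, if_neg (by omega : ¬ (startslash - c = 0)),
              show startslash - (c + 1) = startslash - c - 1 by omega]
        · simp [he]
      · rw [show slashLoopA startslash endslash ((ip, '/') :: tl) (c, s, e) =
              slashLoopA startslash endslash tl
                (c + 1, (if c = startslash then ip + 1 else s),
                 (if c = endslash then ip else e)) by
            simp [slashLoopA, he]]
        rw [ih, hpos]
        refine Prod.ext ?_ (Prod.ext ?_ ?_)
        · simp; omega
        · show pickI ((slashPos tl).map (· + 1)) (startslash - (c + 1))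
              (if c = startslash then ip + 1 else s) =
            pickI ((ip + 1) :: (slashPos tl).map (· + 1)) (startslash - c) s
          simp only [pickI]
          by_cases hs : c = startslash
          · subst hs
            rw [if_pos rfl, if_pos (by omega : c - c = 0),
              pickI_neg _ _ _ (by omega : c - (c + 1) < 0)]
          · rw [if_neg hs, if_neg (by omega : ¬ (startslash - c = 0)),
              show startslash - (c + 1) = startslash - c - 1 by omega]
        · show (if endslash = -1 then (if c = endslash then ip else e)
                else pickI (slashPos tl) (endslash - (c + 1)) (if c = endslash then ip else e)) =
            (if endslash = -1 then e else pickI (ip :: slashPos tl) (endslash - c) e)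
          rw [if_neg he, if_neg he]
          simp only [pickI]
          by_cases hs : c = endslash
          · subst hs
            rw [if_pos rfl, if_pos (by omega : c - c = 0),
              pickI_neg _ _ _ (by omega : c - (c + 1) < 0)]
          · rw [if_neg hs, if_neg (by omega : ¬ (endslash - c = 0)),
              show endslash - (c + 1) = endslash - c - 1 by omega]
    · rw [show slashLoopA startslash endslash ((ip, p) :: tl) (c, s, e) =
            slashLoopA startslash endslash tl (c, s, e) by simp [slashLoopA, hp]]
      rw [ih]
      simp [slashPos, hp]

-- start indices agree: A's table lookup equals B's guarded pyGetD
lemma start_eq (ps : List Int) (startslash : Int) :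
    pickI (ps.map (· + 1)) (startslash - 1) 0 =
      (if 1 ≤ startslash ∧ startslash ≤ ps.length
        then PySem.List.pyGetD ps (startslash - 1) 0 + 1 else 0) := by
  by_cases h : 1 ≤ startslash ∧ startslash ≤ ps.length
  · rw [if_pos h,
      pickI_in_range _ _ _ (by omega) (by simp; omega),
      PySem.List.pyGetD_eq_getElem ps 0 (by omega) (by omega)]
    simp
  · rw [if_neg h, pickI_out_of_range]
    simp; omega

-- end indices agree likewise (endslash = -1 never matches A's positive counter)
lemma end_eq (ps : List Int) (endslash : Int) (len : Int) :
    (if endslash = -1 then len else pickI ps (endslash - 1) len) =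
      (if 1 ≤ endslash ∧ endslash ≤ ps.length
        then PySem.List.pyGetD ps (endslash - 1) 0 else len) := by
  by_cases he : endslash = -1
  · rw [if_pos he, if_neg (by omega : ¬ (1 ≤ endslash ∧ endslash ≤ ps.length))]
  · rw [if_neg he]
    by_cases h : 1 ≤ endslash ∧ endslash ≤ ps.length
    · rw [if_pos h,
        pickI_in_range _ _ _ (by omega) (by omega),
        PySem.List.pyGetD_eq_getElem ps 0 (by omega) (by omega)]
    · rw [if_neg h, pickI_out_of_range _ _ _ (by omega)]

-- ===== VERDICT (by name: the statement is the Claim_ definition above) =====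
theorem slashMatchSlash_spec : Claim_equal_slashMatchSlash := by
  intro path startslash endslash _
  unfold Spec_slashMatchSlash slashMatchSlash slashMatchSlash_alt
  rw [slashLoopA_spec]
  show String.ofList (PySem.Chars.slice path.toList
      (some (pickI ((slashPos (PySem.List.enumerate path.toList)).map (· + 1)) (startslash - 1) 0))
      (some (if endslash = -1 then (path.toList.length : Int)
             else pickI (slashPos (PySem.List.enumerate path.toList)) (endslash - 1) (path.toList.length : Int)))
      ++ ['/']) = _
  rw [start_eq, end_eq]
  rfl
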